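-- pv_equiv track=rewrite | github.com/DaMinaup6/algorithm-exercises | hacker_rank/dynamic_programming/hard/angry_children_2.py | angryChildren
-- ===== SOURCE A (Python) =====
-- def angryChildren(k, packets):
--     packets.sort()
--
--     prefix_sums = [packets[0]]
--     for index in range(1, len(packets)):
--         prefix_sums.append(packets[index] + prefix_sums[-1])
--
--     curr_sum = 0
--     # since packets sorted, so we can get unfairness sum in O(k) time
--     # first k unfairness sum == sum_(i = 0)^(k - 1) i * p[i] - (k - 1 - i) * p[i]
--     # where p := packets
--     for index in range(k):
--         curr_sum += index * packets[index] - (k - 1 - index) * packets[index]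
--
--     min_sum = curr_sum
--     for index in range(1, len(packets) - k + 1):
--         curr_sum = curr_sum + (k - 1) * (packets[index + k - 1] + packets[index - 1]) - 2 * (prefix_sums[index + k - 2] - prefix_sums[index - 1])
--         min_sum  = min(min_sum, curr_sum)
--     return min_sum
-- ===== SOURCE B (Python) =====
-- def angryChildren(k, packets):
--     packets.sort()
--     n = len(packets)
--     prefix = [0]
--     wprefix = [0]
--     for i in range(n):
--         prefix.append(prefix[-1] + packets[i])
--         wprefix.append(wprefix[-1] + i * packets[i])
--     best = None
--     for j in range(n - k + 1):
--         s = prefix[j + k] - prefix[j]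
--         w = wprefix[j + k] - wprefix[j]
--         u = 2 * (w - j * s) - (k - 1) * s
--         if best is None or u < best:
--             best = u
--     return best
-- ===== Notes on version B (the rewrite author's own statement) =====
-- stated objective: alternative
-- what changed: B computes each window's unfairness independently in O(1) from a prefix-sum and an index-weighted prefix-sum array and takes the minimum, instead of A's accumulator slid incrementally from the previous window.
-- intended difference: For k == 0 on a nonempty list with positive total sum, A returns -2*sum(packets) (an accident of prefix_sums[-1] negative-index wraparound in its first sliding step), while B returns 0, the correct unfairness of choosing zero packets. — e.g. on angryChildren(0, [1]): A returns -2, B returns 0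
import Mathlib
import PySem

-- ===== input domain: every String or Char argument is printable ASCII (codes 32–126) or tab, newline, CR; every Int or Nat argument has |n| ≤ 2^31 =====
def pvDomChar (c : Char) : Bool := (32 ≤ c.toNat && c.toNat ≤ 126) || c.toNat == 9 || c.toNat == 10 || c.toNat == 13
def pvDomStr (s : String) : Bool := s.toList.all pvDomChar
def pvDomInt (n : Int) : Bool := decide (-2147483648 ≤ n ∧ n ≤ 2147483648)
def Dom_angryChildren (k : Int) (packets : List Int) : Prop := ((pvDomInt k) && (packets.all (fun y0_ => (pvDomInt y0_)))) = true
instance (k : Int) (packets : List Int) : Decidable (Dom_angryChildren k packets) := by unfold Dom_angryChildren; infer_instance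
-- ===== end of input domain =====

-- B replaces A's incrementally slid window accumulator by an independent O(1) closed form per
-- window from prefix and index-weighted prefix sums; both sort `packets` in place in Python
-- (same side effect), and the equivalence proved is about the return value.

-- ===== PORT A =====
def angryChildren (k : Int) (packets : List Int) : Int :=
  let s := PySem.List.sorted packets (fun x => x) false
  let prefix_sums := (PySem.List.pyRange 1 (s.length : Int) 1).foldl
      (fun ps index => ps ++ [PySem.List.pyGetD s index 0 + PySem.List.pyGetD ps (-1) 0])
      [PySem.List.pyGetD s 0 0]     -- packets[0]: in range under Pre_ (packets ≠ [])
  let curr_sum := (PySem.List.pyRange 0 k 1).foldl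
      (fun c index => c + (index * PySem.List.pyGetD s index 0
        - (k - 1 - index) * PySem.List.pyGetD s index 0)) 0
  let r := (PySem.List.pyRange 1 ((s.length : Int) - k + 1) 1).foldl
      (fun (p : Int × Int) index =>
        let c := p.1 + (k - 1) * (PySem.List.pyGetD s (index + k - 1) 0 + PySem.List.pyGetD s (index - 1) 0)
          - 2 * (PySem.List.pyGetD prefix_sums (index + k - 2) 0 - PySem.List.pyGetD prefix_sums (index - 1) 0)
        (c, min p.2 c))
      (curr_sum, curr_sum)
  r.2

-- ===== PORT B =====
def angryChildren_alt (k : Int) (packets : List Int) : Int :=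
  let s := PySem.List.sorted packets (fun x => x) false
  let n : Int := (s.length : Int)
  let pw := (PySem.List.pyRange 0 n 1).foldl
      (fun (pw : List Int × List Int) i =>
        (pw.1 ++ [PySem.List.pyGetD pw.1 (-1) 0 + PySem.List.pyGetD s i 0],
         pw.2 ++ [PySem.List.pyGetD pw.2 (-1) 0 + i * PySem.List.pyGetD s i 0]))
      ([0], [0])
  let best := (PySem.List.pyRange 0 (n - k + 1) 1).foldl
      (fun (best : Option Int) j =>
        let su := PySem.List.pyGetD pw.1 (j + k) 0 - PySem.List.pyGetD pw.1 j 0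
        let w := PySem.List.pyGetD pw.2 (j + k) 0 - PySem.List.pyGetD pw.2 j 0
        let u := 2 * (w - j * su) - (k - 1) * su
        match best with
        | none => some u
        | some m => if u < m then some u else some m)
      none
  -- Python returns `best`, which is None only when there is no window (k > n, excluded by Pre_)
  best.getD 0

-- ===== PRECONDITION & SPEC =====
-- Pre_ excludes exactly the inputs where A raises IndexError: empty packets (packets[0]),
-- k < 0 and k > len(packets) (out-of-range indexing in A's loops).
def Pre_angryChildren (k : Int) (packets : List Int) : Prop :=
  packets ≠ [] ∧ 0 ≤ k ∧ k ≤ (packets.length : Int)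
instance (k : Int) (packets : List Int) : Decidable (Pre_angryChildren k packets) := by
  unfold Pre_angryChildren; infer_instance
def pvWitness_angryChildren : Int × List Int := (2, [4, 1, 3])

-- For k == 0 on a nonempty list with positive total sum, A returns -2*sum(packets) (an accident
-- of prefix_sums[-1] negative-index wraparound in its first sliding step), while B returns 0,
-- the correct unfairness of choosing zero packets.
def D_angryChildren (k : Int) (packets : List Int) : Prop := k = 0 ∧ 0 < packets.sum
instance (k : Int) (packets : List Int) : Decidable (D_angryChildren k packets) := by
  unfold D_angryChildren; infer_instance

def Spec_angryChildren (k : Int) (packets : List Int) (out : Int) : Prop :=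
  ¬ D_angryChildren k packets → out = angryChildren_alt k packets
instance (k : Int) (packets : List Int) (out : Int) : Decidable (Spec_angryChildren k packets out) := by
  unfold Spec_angryChildren; infer_instance

def pvDiffWitness_angryChildren : Int × List Int := (0, [1])
def pvDiffWitnessOut_angryChildren : Int × Int := (-2, 0)

-- ===== CLAIM (what is proved, stated in full; the proofs are below) =====
def Claim_unchanged_angryChildren : Prop := ∀ (k : Int) (packets : List Int), Dom_angryChildren k packets → Pre_angryChildren k packets → Spec_angryChildren k packets (angryChildren k packets)
def Claim_changed_angryChildren : Prop := Dom_angryChildren (pvDiffWitness_angryChildren.1) (pvDiffWitness_angryChildren.2) ∧ Pre_angryChildren (pvDiffWitness_angryChildren.1) (pvDiffWitness_angryChildren.2) ∧ D_angryChildren (pvDiffWitness_angryChildren.1) (pvDiffWitness_angryChildren.2) ∧ angryChildren (pvDiffWitness_angryChildren.1) (pvDiffWitness_angryChildren.2) = pvDiffWitnessOut_angryChildren.1 ∧ angryChildren_alt (pvDiffWitness_angryChildren.1) (pvDiffWitness_angryChildren.2) = pvDiffWitnessOut_angryChildren.2 ∧ pvDiffWitnessOut_angryChildren.1 ≠ 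pvDiffWitnessOut_angryChildren.2
def Claim_exact_angryChildren : Prop := ∀ (k : Int) (packets : List Int), Dom_angryChildren k packets → Pre_angryChildren k packets → D_angryChildren k packets → angryChildren k packets ≠ angryChildren_alt k packets

-- ===== LEMMAS AND PROOFS =====

-- g s i = sorted[i]; pvS/pvT = plain and index-weighted sums over [a, b); pvU = unfairness of
-- the window starting at j of size kn; pvM = min of pvU over window starts 0..j.
def pvG (s : List Int) (i : Nat) : Int := s.getD i 0
def pvS (s : List Int) (a b : Nat) : Int := ∑ i ∈ Finset.Ico a b, pvG s i
def pvT (s : List Int) (a b : Nat) : Int := ∑ i ∈ Finset.Ico a b, (i : Int) * pvG s i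
def pvU (s : List Int) (kn j : Nat) : Int :=
  2 * (pvT s j (j + kn) - (j : Int) * pvS s j (j + kn)) - ((kn : Int) - 1) * pvS s j (j + kn)
def pvM (s : List Int) (kn j : Nat) : Int :=
  ((List.range j).map (fun t => pvU s kn (t + 1))).foldl min (pvU s kn 0)

lemma pvS_range (s : List Int) (m : Nat) : pvS s 0 m = ∑ i ∈ Finset.range m, pvG s i := by
  rw [pvS, Finset.range_eq_Ico]

lemma pvT_range (s : List Int) (m : Nat) : pvT s 0 m = ∑ i ∈ Finset.range m, (i : Int) * pvG s i := by
  rw [pvT, Finset.range_eq_Ico]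

lemma pvS_succ (s : List Int) (m : Nat) : pvS s 0 (m + 1) = pvS s 0 m + pvG s m := by
  rw [pvS_range, pvS_range, Finset.sum_range_succ]

lemma pvT_succ (s : List Int) (m : Nat) : pvT s 0 (m + 1) = pvT s 0 m + (m : Int) * pvG s m := by
  rw [pvT_range, pvT_range, Finset.sum_range_succ]

lemma pvS_zero (s : List Int) : pvS s 0 0 = 0 := by simp [pvS]

lemma pvT_zero (s : List Int) : pvT s 0 0 = 0 := by simp [pvT]

lemma pvS_one (s : List Int) : pvS s 0 1 = pvG s 0 := by
  rw [pvS_range]; simp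

lemma pv_sum (s : List Int) : pvS s 0 s.length = s.sum := by
  induction s with
  | nil => simp [pvS]
  | cons x xs ih =>
    rw [List.length_cons, pvS_range, Finset.sum_range_succ']
    simp only [pvG, List.getD_cons_succ, List.getD_cons_zero, List.sum_cons]
    have h : ∑ i ∈ Finset.range xs.length, xs.getD i 0 = xs.sum := by
      rw [← ih, pvS_range]; simp only [pvG]
    rw [h]; ring

-- pvU written with prefix sums only
lemma pvU_prefix (s : List Int) (kn j : Nat) :
    pvU s kn j = 2 * ((pvT s 0 (j + kn) - pvT s 0 j) - (j : Int) * (pvS s 0 (j + kn) - pvS s 0 j))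
      - ((kn : Int) - 1) * (pvS s 0 (j + kn) - pvS s 0 j) := by
  have hS : pvS s 0 j + pvS s j (j + kn) = pvS s 0 (j + kn) :=
    Finset.sum_Ico_consecutive _ (Nat.zero_le j) (Nat.le_add_right j kn)
  have hT : pvT s 0 j + pvT s j (j + kn) = pvT s 0 (j + kn) :=
    Finset.sum_Ico_consecutive _ (Nat.zero_le j) (Nat.le_add_right j kn)
  rw [pvU]
  have h1 : pvS s j (j + kn) = pvS s 0 (j + kn) - pvS s 0 j := by omega
  have h2 : pvT s j (j + kn) = pvT s 0 (j + kn) - pvT s 0 j := by omega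
  rw [h1, h2]

-- the sliding-window step identity
lemma pvU_succ (s : List Int) (kn j : Nat) :
    pvU s kn (j + 1) = pvU s kn j + ((kn : Int) - 1) * (pvG s (j + kn) + pvG s j)
      - 2 * (pvS s 0 (j + kn) - pvS s 0 (j + 1)) := by
  rw [pvU_prefix, pvU_prefix]
  have e1 : j + 1 + kn = (j + kn) + 1 := by omega
  rw [e1, pvS_succ s (j + kn), pvT_succ s (j + kn), pvS_succ s j, pvT_succ s j]
  push_cast
  ring

lemma pvU_zero_eq (s : List Int) (kn : Nat) :
    pvU s kn 0 = ∑ i ∈ Finset.range kn, (2 * (i : Int) - ((kn : Int) - 1)) * pvG s i := by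
  have h : ∀ i ∈ Finset.range kn,
      (2 * (i : Int) - ((kn : Int) - 1)) * pvG s i
        = 2 * ((i : Int) * pvG s i) - ((kn : Int) - 1) * pvG s i := fun i _ => by ring
  rw [Finset.sum_congr rfl h, Finset.sum_sub_distrib, ← Finset.mul_sum, ← Finset.mul_sum,
    ← pvS_range, ← pvT_range, pvU]
  simp

-- A's first-window loop
lemma pv_foldA2 (s : List Int) (k0 c : Int) (m : Nat) :
    (PySem.List.pyRange 0 (m : Int) 1).foldl
      (fun c index => c + (index * PySem.List.pyGetD s index 0
        - (k0 - 1 - index) * PySem.List.pyGetD s index 0)) c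
    = c + ∑ i ∈ Finset.range m, (2 * (i : Int) - (k0 - 1)) * pvG s i := by
  induction m with
  | zero => simp [PySem.List.pyRange_one_eq_nil]
  | succ n ih =>
    have hc : ((n + 1 : Nat) : Int) = (n : Int) + 1 := by push_cast; ring
    rw [hc, PySem.List.pyRange_one_succ_right (by positivity), List.foldl_append, ih]
    simp only [List.foldl_cons, List.foldl_nil, PySem.List.pyGetD_natCast]
    rw [Finset.sum_range_succ]
    show c + _ + _ = _
    rw [pvG]
    ring

lemma pv_currA (s : List Int) (kn : Nat) :
    (PySem.List.pyRange 0 ((kn : Nat) : Int) 1).foldl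
      (fun c index => c + (index * PySem.List.pyGetD s index 0
        - (((kn : Nat) : Int) - 1 - index) * PySem.List.pyGetD s index 0)) 0
    = pvU s kn 0 := by
  rw [pv_foldA2, pvU_zero_eq]; ring

lemma pvG_def (s : List Int) (i : Nat) : s.getD i 0 = pvG s i := rfl

-- A's prefix_sums list is the list of prefix sums pvS s 0 1 .. pvS s 0 (m+1)
lemma pv_prefixA (s : List Int) (m : Nat) :
    (PySem.List.pyRange 1 ((m + 1 : Nat) : Int) 1).foldl
      (fun ps index => ps ++ [PySem.List.pyGetD s index 0 + PySem.List.pyGetD ps (-1) 0])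
      [PySem.List.pyGetD s 0 0]
    = (List.range (m + 1)).map (fun t => pvS s 0 (t + 1)) := by
  induction m with
  | zero =>
    rw [show ((0 + 1 : Nat) : Int) = 1 by norm_num, PySem.List.pyRange_one_eq_nil le_rfl]
    simp [PySem.List.pyGetD_zero, pvS_one, pvG, List.getD]
  | succ n ih =>
    rw [show ((n + 1 + 1 : Nat) : Int) = ((n + 1 : Nat) : Int) + 1 by push_cast; ring,
      PySem.List.pyRange_one_succ_right (by omega), List.foldl_append, ih]
    simp only [List.foldl_cons, List.foldl_nil]
    have hlast : PySem.List.pyGetD ((List.range (n + 1)).map (fun t => pvS s 0 (t + 1))) (-1) 0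
        = pvS s 0 (n + 1) := by
      rw [List.range_succ, List.map_append, List.map_singleton]
      exact PySem.List.pyGetD_neg_one_append_singleton _ _ _
    rw [hlast, PySem.List.pyGetD_natCast, pvG_def]
    conv_rhs => rw [List.range_succ, List.map_append, List.map_singleton]
    rw [pvS_succ s (n + 1)]
    simp [add_comm]

-- B's prefix / weighted-prefix pair
lemma pv_loopB (s : List Int) (n : Nat) :
    (PySem.List.pyRange 0 (n : Int) 1).foldl
      (fun (pw : List Int × List Int) i =>
        (pw.1 ++ [PySem.List.pyGetD pw.1 (-1) 0 + PySem.List.pyGetD s i 0],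
         pw.2 ++ [PySem.List.pyGetD pw.2 (-1) 0 + i * PySem.List.pyGetD s i 0]))
      ([0], [0])
    = ((List.range (n + 1)).map (fun t => pvS s 0 t),
       (List.range (n + 1)).map (fun t => pvT s 0 t)) := by
  induction n with
  | zero =>
    rw [show ((0 : Nat) : Int) = 0 by norm_num, PySem.List.pyRange_one_eq_nil le_rfl]
    simp [pvS_zero, pvT_zero]
  | succ n ih =>
    rw [show ((n + 1 : Nat) : Int) = ((n : Nat) : Int) + 1 by push_cast; ring,
      PySem.List.pyRange_one_succ_right (by omega), List.foldl_append, ih]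
    simp only [List.foldl_cons, List.foldl_nil]
    have h1 : PySem.List.pyGetD ((List.range (n + 1)).map (fun t => pvS s 0 t)) (-1) 0
        = pvS s 0 n := by
      rw [List.range_succ, List.map_append, List.map_singleton]
      exact PySem.List.pyGetD_neg_one_append_singleton _ _ _
    have h2 : PySem.List.pyGetD ((List.range (n + 1)).map (fun t => pvT s 0 t)) (-1) 0
        = pvT s 0 n := by
      rw [List.range_succ, List.map_append, List.map_singleton]
      exact PySem.List.pyGetD_neg_one_append_singleton _ _ _
    rw [h1, h2, PySem.List.pyGetD_natCast, pvG_def]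
    simp only [Prod.mk.injEq]
    constructor
    · conv_rhs => rw [List.range_succ, List.map_append, List.map_singleton]
      rw [pvS_succ s n]
    · conv_rhs => rw [List.range_succ, List.map_append, List.map_singleton]
      rw [pvT_succ s n]

-- generic form of A's main loop: each step adds u t - u (t-1) and tracks the min
lemma pv_foldA_gen (G : (Int × Int) → Int → (Int × Int)) (u : Nat → Int) (m : Nat)
    (hG : ∀ (p : Int × Int) (t : Nat), 1 ≤ t → t ≤ m →
      G p (t : Int) = (p.1 + (u t - u (t - 1)), min p.2 (p.1 + (u t - u (t - 1))))) :
    (PySem.List.pyRange 1 ((m : Int) + 1) 1).foldl G (u 0, u 0)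
    = (u m, ((List.range m).map (fun t => u (t + 1))).foldl min (u 0)) := by
  induction m with
  | zero =>
    rw [show ((0 : Nat) : Int) + 1 = 1 by norm_num, PySem.List.pyRange_one_eq_nil le_rfl]
    simp
  | succ n ih =>
    rw [show ((n + 1 : Nat) : Int) + 1 = ((n : Nat) : Int) + 1 + 1 by push_cast; ring,
      PySem.List.pyRange_one_succ_right (by omega), List.foldl_append,
      ih (fun p t h1 h2 => hG p t h1 (by omega))]
    simp only [List.foldl_cons, List.foldl_nil]
    rw [show ((n : Nat) : Int) + 1 = ((n + 1 : Nat) : Int) by push_cast; ring,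
      hG _ (n + 1) (by omega) le_rfl]
    simp only [Nat.add_sub_cancel, Prod.mk.injEq]
    constructor
    · ring
    · conv_rhs => rw [List.range_succ, List.map_append, List.map_singleton, List.foldl_append]
      simp only [List.foldl_cons, List.foldl_nil]
      congr 1
      ring

-- generic form of B's min loop over windows 0..m with a None sentinel
lemma pv_foldmin_gen (F : Option Int → Int → Option Int) (w : Nat → Int) (m : Nat)
    (hnone : ∀ t : Nat, t ≤ m → F none (t : Int) = some (w t))
    (hsome : ∀ (M : Int) (t : Nat), t ≤ m → F (some M) (t : Int) = some (min M (w t))) :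
    (PySem.List.pyRange 0 ((m : Int) + 1) 1).foldl F none
    = some (((List.range m).map (fun t => w (t + 1))).foldl min (w 0)) := by
  induction m with
  | zero =>
    rw [show ((0 : Nat) : Int) + 1 = 0 + 1 by norm_num, PySem.List.pyRange_one_succ_right le_rfl,
      PySem.List.pyRange_one_eq_nil le_rfl]
    simp only [List.nil_append, List.foldl_cons, List.foldl_nil]
    rw [show (0 : Int) = ((0 : Nat) : Int) by norm_num, hnone 0 (by omega)]
    simp
  | succ n ih =>
    rw [show ((n + 1 : Nat) : Int) + 1 = ((n : Nat) : Int) + 1 + 1 by push_cast; ring,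
      PySem.List.pyRange_one_succ_right (by omega), List.foldl_append,
      ih (fun t h => hnone t (by omega)) (fun M t h => hsome M t (by omega))]
    rw [show ((n : Nat) : Int) + 1 = ((n + 1 : Nat) : Int) by push_cast; ring]
    simp only [List.foldl_cons, List.foldl_nil]
    rw [hsome _ (n + 1) le_rfl]
    conv_rhs => rw [List.range_succ, List.map_append, List.map_singleton, List.foldl_append]
    simp

-- folding min over a constant list
lemma pv_foldl_min_const (c a : Int) (m : Nat) :
    ((List.range m).map (fun _ => c)).foldl min a = if m = 0 then a else min a c := by
  induction m with
  | zero => simp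
  | succ n ih =>
    rw [List.range_succ, List.map_append, List.map_singleton, List.foldl_append, ih]
    rcases Nat.eq_zero_or_pos n with h | h
    · simp [h]
    · simp only [List.foldl_cons, List.foldl_nil]
      rw [if_neg (by omega), if_neg (by omega), min_assoc, min_self]

-- A's value for 1 ≤ k ≤ len(packets)
lemma pv_A_main (packets : List Int) (kn : Nat) (hk : 1 ≤ kn) (hkL : kn ≤ packets.length) :
    angryChildren (kn : Int) packets
    = pvM (PySem.List.sorted packets (fun x => x) false) kn (packets.length - kn) := by
  simp only [angryChildren]
  set s := PySem.List.sorted packets (fun x => x) false with hs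
  have hL : s.length = packets.length := PySem.List.length_sorted packets (fun x => x) false
  rw [show (s.length : Int) = ((s.length - 1 + 1 : Nat) : Int) by omega, pv_prefixA,
    show s.length - 1 + 1 = s.length by omega, pv_currA,
    show (s.length : Int) - (kn : Int) + 1 = ((s.length - kn : Nat) : Int) + 1 by omega]
  rw [pv_foldA_gen _ (pvU s kn) (s.length - kn) ?hG]
  · rw [hL]; rfl
  case hG =>
    intro p t h1 h2
    rw [show ((t : Int) + (kn : Int) - 1) = ((t + kn - 1 : Nat) : Int) by omega,
      show ((t : Int) - 1) = ((t - 1 : Nat) : Int) by omega,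
      show ((t : Int) + (kn : Int) - 2) = ((t + kn - 2 : Nat) : Int) by omega]
    have e1 : PySem.List.pyGetD s ((t + kn - 1 : Nat) : Int) 0 = pvG s (t + kn - 1) := by
      rw [PySem.List.pyGetD_natCast, pvG_def]
    have e2 : PySem.List.pyGetD s ((t - 1 : Nat) : Int) 0 = pvG s (t - 1) := by
      rw [PySem.List.pyGetD_natCast, pvG_def]
    have e3 : PySem.List.pyGetD ((List.range s.length).map (fun u => pvS s 0 (u + 1)))
        ((t + kn - 2 : Nat) : Int) 0 = pvS s 0 (t + kn - 1) := by
      rw [PySem.List.pyGetD_natCast, PySem.List.getD_map_range _ _ _ _ (by omega),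
        show t + kn - 2 + 1 = t + kn - 1 by omega]
    have e4 : PySem.List.pyGetD ((List.range s.length).map (fun u => pvS s 0 (u + 1)))
        ((t - 1 : Nat) : Int) 0 = pvS s 0 t := by
      rw [PySem.List.pyGetD_natCast, PySem.List.getD_map_range _ _ _ _ (by omega),
        show t - 1 + 1 = t by omega]
    rw [e1, e2, e3, e4]
    have hstep := pvU_succ s kn (t - 1)
    rw [show t - 1 + 1 = t by omega, show t - 1 + kn = t + kn - 1 by omega] at hstep
    have key : ∀ x : Int,
        x + ((kn : Int) - 1) * (pvG s (t + kn - 1) + pvG s (t - 1))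
          - 2 * (pvS s 0 (t + kn - 1) - pvS s 0 t)
        = x + (pvU s kn t - pvU s kn (t - 1)) := by
      intro x; linear_combination (-1 : Int) * hstep
    rw [key p.1]

-- B's value for 1 ≤ k ≤ len(packets)
lemma pv_B_main (packets : List Int) (kn : Nat) (hk : 1 ≤ kn) (hkL : kn ≤ packets.length) :
    angryChildren_alt (kn : Int) packets
    = pvM (PySem.List.sorted packets (fun x => x) false) kn (packets.length - kn) := by
  simp only [angryChildren_alt]
  set s := PySem.List.sorted packets (fun x => x) false with hs
  have hL : s.length = packets.length := PySem.List.length_sorted packets (fun x => x) false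
  rw [pv_loopB s s.length]
  simp only
  rw [show (s.length : Int) - (kn : Int) + 1 = ((s.length - kn : Nat) : Int) + 1 by omega]
  rw [pv_foldmin_gen _ (pvU s kn) (s.length - kn) ?hnone ?hsome]
  · rw [hL]; rfl
  case hnone =>
    intro t ht
    rw [show ((t : Int) + (kn : Int)) = ((t + kn : Nat) : Int) by omega]
    have e1 : PySem.List.pyGetD ((List.range (s.length + 1)).map (fun u => pvS s 0 u))
        ((t + kn : Nat) : Int) 0 = pvS s 0 (t + kn) := by
      rw [PySem.List.pyGetD_natCast, PySem.List.getD_map_range _ _ _ _ (by omega)]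
    have e2 : PySem.List.pyGetD ((List.range (s.length + 1)).map (fun u => pvS s 0 u))
        ((t : Nat) : Int) 0 = pvS s 0 t := by
      rw [PySem.List.pyGetD_natCast, PySem.List.getD_map_range _ _ _ _ (by omega)]
    have e3 : PySem.List.pyGetD ((List.range (s.length + 1)).map (fun u => pvT s 0 u))
        ((t + kn : Nat) : Int) 0 = pvT s 0 (t + kn) := by
      rw [PySem.List.pyGetD_natCast, PySem.List.getD_map_range _ _ _ _ (by omega)]
    have e4 : PySem.List.pyGetD ((List.range (s.length + 1)).map (fun u => pvT s 0 u))
        ((t : Nat) : Int) 0 = pvT s 0 t := by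
      rw [PySem.List.pyGetD_natCast, PySem.List.getD_map_range _ _ _ _ (by omega)]
    rw [e1, e2, e3, e4]
    exact congrArg some (pvU_prefix s kn t).symm
  case hsome =>
    intro M t ht
    rw [show ((t : Int) + (kn : Int)) = ((t + kn : Nat) : Int) by omega]
    have e1 : PySem.List.pyGetD ((List.range (s.length + 1)).map (fun u => pvS s 0 u))
        ((t + kn : Nat) : Int) 0 = pvS s 0 (t + kn) := by
      rw [PySem.List.pyGetD_natCast, PySem.List.getD_map_range _ _ _ _ (by omega)]
    have e2 : PySem.List.pyGetD ((List.range (s.length + 1)).map (fun u => pvS s 0 u))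
        ((t : Nat) : Int) 0 = pvS s 0 t := by
      rw [PySem.List.pyGetD_natCast, PySem.List.getD_map_range _ _ _ _ (by omega)]
    have e3 : PySem.List.pyGetD ((List.range (s.length + 1)).map (fun u => pvT s 0 u))
        ((t + kn : Nat) : Int) 0 = pvT s 0 (t + kn) := by
      rw [PySem.List.pyGetD_natCast, PySem.List.getD_map_range _ _ _ _ (by omega)]
    have e4 : PySem.List.pyGetD ((List.range (s.length + 1)).map (fun u => pvT s 0 u))
        ((t : Nat) : Int) 0 = pvT s 0 t := by
      rw [PySem.List.pyGetD_natCast, PySem.List.getD_map_range _ _ _ _ (by omega)]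
    rw [e1, e2, e3, e4, ← pvU_prefix s kn t]
    show (if pvU s kn t < M then some (pvU s kn t) else some M) = some (min M (pvU s kn t))
    split_ifs with h
    · rw [min_eq_right h.le]
    · rw [min_eq_left (not_lt.mp h)]

def pvZ (s : List Int) (t : Nat) : Int := if t = 0 then 0 else -2 * pvS s 0 s.length

-- A's value for k = 0 on a nonempty list: the wraparound prefix_sums[-1] gives min 0 (-2*sum)
lemma pv_A_zero (packets : List Int) (hne : packets ≠ []) :
    angryChildren 0 packets = min 0 (-2 * packets.sum) := by
  simp only [angryChildren]
  set s := PySem.List.sorted packets (fun x => x) false with hs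
  have hL : s.length = packets.length := PySem.List.length_sorted packets (fun x => x) false
  have hL1 : 1 ≤ s.length := by
    rw [hL]; exact List.length_pos_iff.mpr hne
  rw [show PySem.List.pyRange (0 : Int) 0 1 = [] from PySem.List.pyRange_one_eq_nil le_rfl]
  simp only [List.foldl_nil]
  rw [show (s.length : Int) = ((s.length - 1 + 1 : Nat) : Int) by omega, pv_prefixA,
    show s.length - 1 + 1 = s.length by omega,
    show (s.length : Int) - 0 + 1 = (s.length : Int) + 1 by ring]
  have h00 : ((0 : Int), (0 : Int)) = (pvZ s 0, pvZ s 0) := by simp [pvZ]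
  rw [h00, pv_foldA_gen _ (pvZ s) s.length ?hG]
  · have hmap : (List.range s.length).map (fun t => pvZ s (t + 1))
        = (List.range s.length).map (fun _ => -2 * pvS s 0 s.length) :=
      List.map_congr_left (fun a _ => by simp [pvZ])
    simp only [hmap, pv_foldl_min_const]
    rw [if_neg (by omega : ¬ s.length = 0)]
    have h0 : pvZ s 0 = 0 := by simp [pvZ]
    rw [h0, pv_sum, List.Perm.sum_eq (PySem.List.sorted_perm packets (fun x => x) false)]
  case hG =>
    intro p t h1 h2
    by_cases ht1 : t = 1
    · subst ht1
      rw [show ((1 : Nat) : Int) + 0 - 1 = (((0 : Nat)) : Int) by omega,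
        show ((1 : Nat) : Int) - 1 = (((0 : Nat)) : Int) by omega,
        show ((1 : Nat) : Int) + 0 - 2 = (-1 : Int) by omega]
      have e1 : PySem.List.pyGetD s (((0 : Nat)) : Int) 0 = pvG s 0 := by
        rw [PySem.List.pyGetD_natCast, pvG_def]
      have e3 : PySem.List.pyGetD ((List.range s.length).map (fun u => pvS s 0 (u + 1)))
          (-1) 0 = pvS s 0 s.length := by
        obtain ⟨m, hm⟩ : ∃ m, s.length = m + 1 := ⟨s.length - 1, by omega⟩
        rw [hm, List.range_succ, List.map_append, List.map_singleton,
          PySem.List.pyGetD_neg_one_append_singleton]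
      have e4 : PySem.List.pyGetD ((List.range s.length).map (fun u => pvS s 0 (u + 1)))
          (((0 : Nat)) : Int) 0 = pvS s 0 1 := by
        rw [PySem.List.pyGetD_natCast, PySem.List.getD_map_range _ _ _ _ (by omega)]
      rw [e1, e3, e4]
      have key : ∀ x : Int,
          x + ((0 : Int) - 1) * (pvG s 0 + pvG s 0) - 2 * (pvS s 0 s.length - pvS s 0 1)
          = x + (pvZ s 1 - pvZ s (1 - 1)) := by
        intro x
        rw [pvS_one]
        simp only [pvZ, show (1 : Nat) - 1 = 0 from rfl,
          if_neg (by omega : ¬ (1 : Nat) = 0)]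
        simp
        ring
      rw [key p.1]
    · rw [show ((t : Int)) + 0 - 1 = ((t - 1 : Nat) : Int) by omega,
        show ((t : Int)) - 1 = ((t - 1 : Nat) : Int) by omega,
        show ((t : Int)) + 0 - 2 = ((t - 2 : Nat) : Int) by omega]
      have e1 : PySem.List.pyGetD s ((t - 1 : Nat) : Int) 0 = pvG s (t - 1) := by
        rw [PySem.List.pyGetD_natCast, pvG_def]
      have e3 : PySem.List.pyGetD ((List.range s.length).map (fun u => pvS s 0 (u + 1)))
          ((t - 2 : Nat) : Int) 0 = pvS s 0 (t - 1) := by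
        rw [PySem.List.pyGetD_natCast, PySem.List.getD_map_range _ _ _ _ (by omega),
          show t - 2 + 1 = t - 1 by omega]
      have e4 : PySem.List.pyGetD ((List.range s.length).map (fun u => pvS s 0 (u + 1)))
          ((t - 1 : Nat) : Int) 0 = pvS s 0 t := by
        rw [PySem.List.pyGetD_natCast, PySem.List.getD_map_range _ _ _ _ (by omega),
          show t - 1 + 1 = t by omega]
      rw [e1, e3, e4]
      have hS : pvS s 0 t = pvS s 0 (t - 1) + pvG s (t - 1) := by
        have := pvS_succ s (t - 1)
        rw [show t - 1 + 1 = t by omega] at this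
        exact this
      have key : ∀ x : Int,
          x + ((0 : Int) - 1) * (pvG s (t - 1) + pvG s (t - 1)) - 2 * (pvS s 0 (t - 1) - pvS s 0 t)
          = x + (pvZ s t - pvZ s (t - 1)) := by
        intro x
        simp only [pvZ, if_neg (by omega : ¬ t = 0), if_neg (by omega : ¬ t - 1 = 0)]
        linear_combination (2 : Int) * hS
      rw [key p.1]

-- B's value for k = 0: every window is empty, so the minimum unfairness is 0
lemma pv_B_zero (packets : List Int) :
    angryChildren_alt 0 packets = 0 := by
  simp only [angryChildren_alt]
  set s := PySem.List.sorted packets (fun x => x) false with hs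
  rw [pv_loopB s s.length]
  simp only
  rw [show (s.length : Int) - 0 + 1 = (s.length : Int) + 1 by ring,
    pv_foldmin_gen _ (fun _ => (0 : Int)) s.length ?hnone ?hsome]
  · simp only [Option.getD_some]
    rw [pv_foldl_min_const]
    split_ifs <;> simp
  case hnone =>
    intro t ht
    rw [show ((t : Int)) + 0 = ((t : Int)) by ring]
    show some _ = some (0 : Int)
    norm_num
  case hsome =>
    intro M t ht
    rw [show ((t : Int)) + 0 = ((t : Int)) by ring]
    show (if _ < M then _ else _) = some (min M 0)
    norm_num
    split_ifs with h
    · rw [min_eq_right h.le]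
    · rw [min_eq_left (not_lt.mp h)]

theorem angryChildren_spec : Claim_unchanged_angryChildren := by
  unfold Claim_unchanged_angryChildren
  intro k packets hdom hpre
  unfold Spec_angryChildren
  intro hnd
  obtain ⟨hne, hk0, hkL⟩ := hpre
  obtain ⟨kn, rfl⟩ : ∃ kn : Nat, k = (kn : Int) := ⟨k.toNat, (Int.toNat_of_nonneg hk0).symm⟩
  rcases Nat.eq_zero_or_pos kn with h0 | h1
  · subst h0
    simp only [Nat.cast_zero]
    rw [pv_A_zero packets hne, pv_B_zero packets]
    have hsum : packets.sum ≤ 0 := by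
      by_contra h
      exact hnd ⟨by norm_num, by omega⟩
    rw [min_eq_left (by omega : (0 : Int) ≤ -2 * packets.sum)]
  · have hkL' : kn ≤ packets.length := by exact_mod_cast hkL
    rw [pv_A_main packets kn h1 hkL', pv_B_main packets kn h1 hkL']

theorem angryChildren_changed : Claim_changed_angryChildren := by
  unfold Claim_changed_angryChildren; decide
theorem angryChildren_tight : Claim_exact_angryChildren := by
  unfold Claim_exact_angryChildren
  intro k packets hdom hpre hd
  obtain ⟨hne, hk0, hkL⟩ := hpre
  obtain ⟨hk, hsum⟩ := hd
  subst hk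
  rw [pv_A_zero packets hne, pv_B_zero packets,
    min_eq_right (by omega : -2 * packets.sum ≤ 0)]
  omega
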